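-- pv_equiv track=rewrite | github.com/liqiuling1/GRPO-B | model_utils.py | truncate_on_stop_strings
-- ===== SOURCE A (Python) =====
-- from typing import Any, Dict, List, Optional
--
-- def truncate_on_stop_strings(text: str, stop_strings: Optional[List[str]] = None) -> str:
--     if not stop_strings:
--         return text.strip()
--
--     truncated = text
--     for stop_string in stop_strings:
--         if not stop_string:
--             continue
--         stop_index = truncated.find(stop_string)
--         if stop_index != -1:
--             truncated = truncated[:stop_index]
--     return truncated.strip()
-- ===== SOURCE B (Python) =====
-- from typing import List, Optional
--
--
-- def truncate_on_stop_strings(text: str, stop_strings: Optional[List[str]] = None) -> str: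
--     if not stop_strings:
--         return text.strip()
--
--     # Pass 1: search the ORIGINAL text once per stop string, recording
--     # (first-occurrence index, length) for each non-empty stop string.
--     hits = [(text.find(s), len(s)) for s in stop_strings if s]
--
--     # Pass 2: pure arithmetic reduction, no string operations: a hit lowers
--     # the cut point only if the whole occurrence lies before the current cut
--     # (this is exactly when A's progressive find would have seen it).
--     k = len(text)
--     for p, l in hits:
--         if p != -1 and p + l <= k:
--             k = p
--     return text[:k].strip()
-- ===== Notes on version B (the rewrite author's own statement) =====
-- stated objective: alternative
-- what changed: B replaces A's progressive truncation (re-searching and re-slicing a shrinking string copy per stop) by two staged passes: first gather (first-occurrence-in-original-text index, length) pairs for the non-empty stops, then a pure arithmetic fold over those pairs that lowers a cut point only when the whole occurrence fits before it; one slice+strip at the end, correct because a match inside a prefix of text is exactly a full-text first occurrence that fits within the prefix.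
import Mathlib
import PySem

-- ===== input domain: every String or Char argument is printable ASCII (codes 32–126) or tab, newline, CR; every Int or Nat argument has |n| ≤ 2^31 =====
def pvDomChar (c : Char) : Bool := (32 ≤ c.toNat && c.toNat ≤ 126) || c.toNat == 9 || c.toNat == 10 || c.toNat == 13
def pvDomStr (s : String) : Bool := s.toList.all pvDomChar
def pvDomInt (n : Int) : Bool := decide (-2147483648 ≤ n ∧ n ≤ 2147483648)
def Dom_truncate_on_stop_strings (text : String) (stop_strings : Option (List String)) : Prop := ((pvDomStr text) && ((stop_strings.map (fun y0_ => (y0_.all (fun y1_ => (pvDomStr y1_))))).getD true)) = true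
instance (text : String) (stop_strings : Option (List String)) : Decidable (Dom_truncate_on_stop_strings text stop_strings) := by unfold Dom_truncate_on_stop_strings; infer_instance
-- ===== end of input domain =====

-- B replaces A's progressive truncation loop by two staged passes: gather
-- (first-occurrence index in the ORIGINAL text, length) per non-empty stop,
-- then a pure arithmetic fold lowering a cut point; same return value.

-- ===== PORT A =====
-- loop body of A: possibly truncate `truncated` at the first occurrence of `stop_string`
def pvStepA (truncated : String) (stop_string : String) : String :=
  if stop_string.toList = [] then truncated
  else
    let stop_index := PySem.Str.find truncated stop_string
    if stop_index ≠ -1 then PySem.Str.slice truncated none (some stop_index) else truncated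

def truncate_on_stop_strings (text : String) (stop_strings : Option (List String)) : String :=
  match stop_strings with
  | none => PySem.Str.strip text
  | some stops =>
    if stops = [] then PySem.Str.strip text
    else PySem.Str.strip (stops.foldl pvStepA text)

-- ===== PORT B =====
-- arithmetic loop body of B on a gathered (index, length) pair
def pvStepB (k : Int) (pl : Int × Int) : Int :=
  if pl.1 ≠ -1 ∧ pl.1 + pl.2 ≤ k then pl.1 else k

def truncate_on_stop_strings_alt (text : String) (stop_strings : Option (List String)) : String :=
  match stop_strings with
  | none => PySem.Str.strip text
  | some stops =>
    if stops = [] then PySem.Str.strip text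
    else
      let hits := (stops.filter (fun s => decide (s.toList ≠ []))).map
        (fun s => (PySem.Str.find text s, PySem.Str.len s))
      let k := hits.foldl pvStepB (PySem.Str.len text)
      PySem.Str.strip (PySem.Str.slice text none (some k))

-- ===== PRECONDITION & SPEC =====
def Spec_truncate_on_stop_strings (text : String) (stop_strings : Option (List String)) (out : String) : Prop := out = truncate_on_stop_strings_alt text stop_strings
instance (text : String) (stop_strings : Option (List String)) (out : String) : Decidable (Spec_truncate_on_stop_strings text stop_strings out) := by unfold Spec_truncate_on_stop_strings; infer_instance

-- ===== CLAIM (what is proved, stated in full; the proofs are below) =====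
def Claim_equal_truncate_on_stop_strings : Prop := ∀ (text : String) (stop_strings : Option (List String)), Dom_truncate_on_stop_strings text stop_strings → Spec_truncate_on_stop_strings text stop_strings (truncate_on_stop_strings text stop_strings)

-- ===== LEMMAS AND PROOFS =====

-- a first occurrence inside the prefix t.take k is exactly a full-text first
-- occurrence that fits entirely before k
theorem pv_occ_take (t s : List Char) (i k : Nat) (hs : s ≠ []) :
    s <+: (t.take k).drop i ↔ (s <+: t.drop i ∧ i + s.length ≤ k) := by
  have h1 : 1 ≤ s.length := by cases s with | nil => simp at hs | cons a l => simp
  rw [List.drop_take, List.prefix_take_iff]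
  constructor
  · rintro ⟨h, hl⟩; exact ⟨h, by omega⟩
  · rintro ⟨h, hl⟩; exact ⟨h, by omega⟩

theorem pv_find_take (t s : List Char) (k : Nat) (hs : s ≠ []) :
    PySem.Chars.find (t.take k) s =
      if 0 ≤ PySem.Chars.find t s ∧ PySem.Chars.find t s + s.length ≤ (k : Int)
      then PySem.Chars.find t s else -1 := by
  set p := PySem.Chars.find t s with hp
  have hge : -1 ≤ p := PySem.Chars.neg_one_le_find t s
  have hEx : (∃ j, s <+: (t.take k).drop j) ↔ PySem.Chars.isIn s (t.take k) = true :=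
    PySem.Chars.exists_prefix_drop_iff_isIn s (t.take k)
  by_cases h0 : 0 ≤ p
  · obtain ⟨hocc, hmin⟩ := PySem.Chars.find_spec (s := t) (sub := s) h0
    by_cases hfit : p + s.length ≤ (k : Int)
    · rw [if_pos ⟨h0, hfit⟩]
      have hocc' : s <+: (t.take k).drop p.toNat :=
        (pv_occ_take t s p.toNat k hs).mpr ⟨hocc, by omega⟩
      have hq0 : 0 ≤ PySem.Chars.find (t.take k) s := by
        rw [PySem.Chars.find_nonneg_iff]
        exact (PySem.Chars.isIn_iff_infix s (t.take k)).mp (hEx.mp ⟨p.toNat, hocc'⟩)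
      set q := PySem.Chars.find (t.take k) s with hq
      obtain ⟨hoccq, hminq⟩ := PySem.Chars.find_spec (s := (t.take k)) (sub := s) hq0
      have hqp : q.toNat ≤ p.toNat := by
        by_contra hlt
        exact hminq p.toNat (by omega) hocc'
      have hoccq' : s <+: t.drop q.toNat := ((pv_occ_take t s q.toNat k hs).mp hoccq).1
      have hpq : p.toNat ≤ q.toNat := by
        by_contra hlt
        exact hmin q.toNat (by omega) hoccq'
      omega
    · rw [if_neg (by intro h; exact hfit h.2)]
      rw [PySem.Chars.find_eq_neg_one_iff]
      intro hinf
      obtain ⟨j, hj⟩ := hEx.mpr ((PySem.Chars.isIn_iff_infix s (t.take k)).mpr hinf)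
      obtain ⟨hjt, hjk⟩ := (pv_occ_take t s j k hs).mp hj
      have : ¬ (j < p.toNat) := fun h => hmin j h hjt
      omega
  · rw [if_neg (by intro h; exact h0 h.1)]
    rw [PySem.Chars.find_eq_neg_one_iff]
    intro hinf
    obtain ⟨j, hj⟩ := hEx.mpr ((PySem.Chars.isIn_iff_infix s (t.take k)).mpr hinf)
    have hjt : s <+: t.drop j := ((pv_occ_take t s j k hs).mp hj).1
    have : 0 ≤ p := by
      rw [hp, PySem.Chars.find_nonneg_iff]
      exact (PySem.Chars.isIn_iff_infix s t).mp
        ((PySem.Chars.exists_prefix_drop_iff_isIn s t).mp ⟨j, hjt⟩)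
    exact h0 this

-- one loop step, in both views (s non-empty)
theorem pv_step_eq (text s : String) (k : Nat) (hs : s.toList ≠ []) :
    ∃ (k2 : Nat), k2 ≤ k ∧ pvStepB (k : Int) (PySem.Str.find text s, PySem.Str.len s) = (k2 : Int) ∧
      pvStepA (String.ofList (text.toList.take k)) s = String.ofList (text.toList.take k2) := by
  have h1 : 1 ≤ s.toList.length := by
    cases h : s.toList with | nil => exact absurd h hs | cons a l => simp
  set p := PySem.Chars.find text.toList s.toList with hp
  have hge : -1 ≤ p := PySem.Chars.neg_one_le_find _ _
  have htake := pv_find_take text.toList s.toList k hs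
  rw [← hp] at htake
  have hB : pvStepB (k : Int) (PySem.Str.find text s, PySem.Str.len s)
      = if p ≠ -1 ∧ p + (s.toList.length : Int) ≤ (k : Int) then p else (k : Int) := by
    unfold pvStepB
    rw [PySem.Str.find_eq, PySem.Str.len_eq, ← hp]
  have hAfind : PySem.Str.find (String.ofList (text.toList.take k)) s
      = PySem.Chars.find (text.toList.take k) s.toList := by
    rw [PySem.Str.find_eq, String.toList_ofList]
  have hAeq : pvStepA (String.ofList (text.toList.take k)) s =
      (if PySem.Chars.find (text.toList.take k) s.toList ≠ -1
       then PySem.Str.slice (String.ofList (text.toList.take k)) none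
         (some (PySem.Chars.find (text.toList.take k) s.toList))
       else String.ofList (text.toList.take k)) := by
    unfold pvStepA
    rw [if_neg hs, hAfind]
  by_cases hcond : 0 ≤ p ∧ p + (s.toList.length : Int) ≤ (k : Int)
  · refine ⟨p.toNat, by omega, ?_, ?_⟩
    · rw [hB, if_pos ⟨by omega, hcond.2⟩]; omega
    · rw [hAeq, htake, if_pos hcond, if_pos (by omega : p ≠ -1)]
      apply String.toList_injective
      rw [PySem.Str.toList_slice, String.toList_ofList, String.toList_ofList,
        PySem.Chars.slice_eq_listSlice, PySem.List.slice_to _ hcond.1, List.take_take]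
      congr 1
      omega
  · refine ⟨k, le_refl _, ?_, ?_⟩
    · rw [hB, if_neg (by rintro ⟨hne, hle⟩; exact hcond ⟨by omega, hle⟩)]
    · rw [hAeq, htake, if_neg hcond, if_neg (by simp)]

-- loop invariant: A's fold on prefixes tracks B's arithmetic fold over the hits
theorem pv_loop_inv (text : String) (stops : List String) :
    ∀ (k : Nat), k ≤ text.toList.length →
      ∃ (k' : Nat), k' ≤ k ∧
        ((stops.filter (fun s => decide (s.toList ≠ []))).map
          (fun s => (PySem.Str.find text s, PySem.Str.len s))).foldl pvStepB (k : Int) = (k' : Int) ∧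
        stops.foldl pvStepA (String.ofList (text.toList.take k)) = String.ofList (text.toList.take k') := by
  induction stops with
  | nil => intro k hk; exact ⟨k, le_refl _, rfl, rfl⟩
  | cons s rest ih =>
    intro k hk
    by_cases hse : s.toList = []
    · obtain ⟨k', h1, h2, h3⟩ := ih k hk
      refine ⟨k', h1, ?_, ?_⟩
      · rw [List.filter_cons_of_neg (by simp [hse])]
        exact h2
      · rw [List.foldl_cons, show pvStepA (String.ofList (text.toList.take k)) s
            = String.ofList (text.toList.take k) from by unfold pvStepA; rw [if_pos hse]]
        exact h3
    · obtain ⟨k2, h21, h22, h23⟩ := pv_step_eq text s k hse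
      obtain ⟨k', h1, h2, h3⟩ := ih k2 (le_trans h21 hk)
      refine ⟨k', le_trans h1 h21, ?_, ?_⟩
      · rw [List.filter_cons_of_pos (by simp [hse]), List.map_cons, List.foldl_cons, h22]
        exact h2
      · rw [List.foldl_cons, h23]
        exact h3

-- ===== VERDICT (by name: the statement is the Claim_ definition above) =====
theorem truncate_on_stop_strings_spec : Claim_equal_truncate_on_stop_strings := by
  intro text stop_strings _
  unfold Spec_truncate_on_stop_strings truncate_on_stop_strings truncate_on_stop_strings_alt
  match stop_strings with
  | none => rfl
  | some stops =>
    by_cases hnil : stops = []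
    · simp [hnil]
    · simp only [hnil, if_false]
      obtain ⟨k', hk1, hk2, hk3⟩ := pv_loop_inv text stops text.toList.length (le_refl _)
      have hinit : String.ofList (text.toList.take text.toList.length) = text := by
        rw [List.take_length]; simp
      rw [hinit] at hk3
      have hlen : PySem.Str.len text = (text.toList.length : Int) := by
        simp [PySem.Str.len_eq]
      rw [hlen, hk2, hk3]
      apply String.toList_injective
      simp only [PySem.Str.toList_strip]
      congr 1
      rw [PySem.Str.toList_slice, PySem.Chars.slice_eq_listSlice,
        PySem.List.slice_to _ (by omega : (0:Int) ≤ (k':Int))]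
      simp
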